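-- pv_equiv track=rewrite | github.com/posl/comment_recommendation | script/mod_gen/2_time/zh/136_B/5.py | count_odd
-- ===== SOURCE A (Python) =====
-- def count_odd(n):
--     if n < 10:
--         return n
--     else:
--         count = 9
--         for i in range(10, n + 1):
--             if i % 10 % 2 == 1:
--                 count += 1
--         return count
-- ===== SOURCE B (Python) =====
-- def count_odd(n):
--     # closed form: for large n the result counts the odd numbers below ten plus the odd numbers from ten to n
--     if n < 10:
--         return n
--     return 4 + (n + 1) // 2
-- ===== Notes on version B (the rewrite author's own statement) =====
-- stated objective: faster
-- what changed: replaced the linear loop that counts odd-last-digit numbers up to n with a constant-time closed-form arithmetic expression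
import Mathlib
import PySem

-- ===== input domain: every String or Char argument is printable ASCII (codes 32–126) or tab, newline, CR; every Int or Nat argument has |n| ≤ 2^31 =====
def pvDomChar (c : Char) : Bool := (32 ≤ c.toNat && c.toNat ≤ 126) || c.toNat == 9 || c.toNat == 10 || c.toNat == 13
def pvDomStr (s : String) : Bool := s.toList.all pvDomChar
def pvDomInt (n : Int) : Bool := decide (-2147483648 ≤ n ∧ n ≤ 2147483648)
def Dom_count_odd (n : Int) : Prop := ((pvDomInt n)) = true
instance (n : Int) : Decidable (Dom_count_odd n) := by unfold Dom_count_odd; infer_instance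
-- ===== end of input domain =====

-- B replaces A's O(n) loop over [10, n] with the closed form 4 + (n+1)//2 (objective: faster).

-- ===== PORT A =====
def count_odd (n : Int) : Int :=
  if n < 10 then n
  else
    (PySem.List.pyRange 10 (n + 1) 1).foldl
      (fun count i => if PySem.Int.mod (PySem.Int.mod i 10) 2 == 1 then count + 1 else count) 9

-- ===== PORT B =====
def count_odd_alt (n : Int) : Int :=
  if n < 10 then n
  else 4 + PySem.Int.floordiv (n + 1) 2

-- ===== PRECONDITION & SPEC =====
def Spec_count_odd (n : Int) (out : Int) : Prop := out = count_odd_alt n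
instance (n : Int) (out : Int) : Decidable (Spec_count_odd n out) := by unfold Spec_count_odd; infer_instance

-- ===== CLAIM (what is proved, stated in full; the proofs are below) =====
def Claim_equal_count_odd : Prop := ∀ (n : Int), Dom_count_odd n → Spec_count_odd n (count_odd n)

-- ===== LEMMAS AND PROOFS =====

theorem count_odd_loop (n : Int) (h : 10 ≤ n) :
    (PySem.List.pyRange 10 (n + 1) 1).foldl
      (fun count i => if PySem.Int.mod (PySem.Int.mod i 10) 2 == 1 then count + 1 else count) 9
      = 4 + PySem.Int.floordiv (n + 1) 2 := by
  induction n, h using Int.le_induction with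
  | base =>
      decide
  | succ m hm ih =>
      rw [show m + 1 + 1 = (m + 1) + 1 from rfl,
          PySem.List.pyRange_one_succ_right (by omega : (10:Int) ≤ m + 1),
          List.foldl_append, ih]
      simp only [List.foldl]
      rw [PySem.Int.mod_eq_emod_of_pos (by omega : (0:Int) < 10),
          PySem.Int.mod_eq_emod_of_pos (by omega : (0:Int) < 2),
          PySem.Int.floordiv_eq_ediv_of_pos (by omega : (0:Int) < 2),
          PySem.Int.floordiv_eq_ediv_of_pos (by omega : (0:Int) < 2)]
      have : (m + 1) % 10 % 2 = (m + 1) % 2 := by omega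
      rw [this]
      rcases Int.even_or_odd (m + 1) with he | ho
      · have h2 : (m + 1) % 2 = 0 := Int.even_iff.mp he
        simp [h2]
        omega
      · have h2 : (m + 1) % 2 = 1 := Int.odd_iff.mp ho
        simp [h2]
        omega

-- ===== VERDICT (by name: the statement is the Claim_ definition above) =====
theorem count_odd_spec : Claim_equal_count_odd := by
  intro n _
  unfold Spec_count_odd count_odd count_odd_alt
  split
  · rfl
  · exact count_odd_loop n (by omega)
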